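-- pv_equiv track=rewrite | github.com/neurosnap/yaplint | packages/blank_lines/blank_lines.py | insert_newlines
-- ===== SOURCE A (Python) =====
-- def insert_newlines(prefix_arr, newline_setting):
--     new_prefix = []
--     detected_newline = False
--     fixed = False
--     counter = 0
--
--     for _str in prefix_arr:
--         diff = newline_setting - counter
--         should_add_newlines = (
--             _str != ''
--             and detected_newline
--             and not fixed
--             and diff != 0
--         )
--
--         if _str == '':
--             detected_newline = True
--             counter = counter + 1
--         elif should_add_newlines:
--             for _ in range(diff):
--                 new_prefix.append('')
--             fixed = True
--         elif _str != '' and not fixed: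
--             counter = 0
--
--         new_prefix.append(_str)
--
--     final_diff = newline_setting - counter
--     if not fixed and final_diff != 0:
--         for _ in range(final_diff):
--             new_prefix.append('')
--
--     return new_prefix
-- ===== SOURCE B (Python) =====
-- def insert_newlines(prefix_arr, newline_setting):
--     arr = list(prefix_arr)
--     counter = 0
--     seen = False
--     pos = None
--     for i, s in enumerate(arr):
--         if s == '':
--             seen = True
--             counter += 1
--         elif seen and newline_setting - counter != 0:
--             pos = i
--             break
--         else:
--             counter = 0
--     if pos is None:
--         return arr + [''] * (newline_setting - counter)
--     return arr[:pos] + [''] * (newline_setting - counter) + arr[pos:]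
-- ===== Notes on version B (the rewrite author's own statement) =====
-- stated objective: alternative
-- what changed: Replaces the flag-driven token-by-token rebuild with a locate-then-splice: one scan finds the first non-empty position needing extra blank lines (tracking consecutive-empty counter and a seen-empty flag), then the result is built by list slicing and concatenation.
import Mathlib
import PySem

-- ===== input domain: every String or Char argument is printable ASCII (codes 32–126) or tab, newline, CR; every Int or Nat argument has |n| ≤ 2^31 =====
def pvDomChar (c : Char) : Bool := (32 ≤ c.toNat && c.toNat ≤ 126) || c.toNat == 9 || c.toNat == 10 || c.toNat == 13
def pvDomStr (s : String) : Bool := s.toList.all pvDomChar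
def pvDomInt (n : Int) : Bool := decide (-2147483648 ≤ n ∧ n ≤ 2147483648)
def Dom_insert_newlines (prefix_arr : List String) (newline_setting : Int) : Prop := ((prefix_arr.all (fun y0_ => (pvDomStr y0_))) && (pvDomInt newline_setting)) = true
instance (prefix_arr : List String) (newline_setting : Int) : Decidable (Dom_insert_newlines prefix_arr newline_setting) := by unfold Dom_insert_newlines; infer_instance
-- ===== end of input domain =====

-- B replaces A's flag-driven token-by-token rebuild with a locate-then-splice construction (alternative decomposition, same cost).

-- ===== PORT A =====
-- state: (new_prefix, detected_newline, fixed, counter)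
def insertNewlinesStep (newline_setting : Int)
    (st : List String × Bool × Bool × Int) (s : String) : List String × Bool × Bool × Int :=
  let np := st.1; let dn := st.2.1; let fx := st.2.2.1; let c := st.2.2.2
  let diff := newline_setting - c
  let should_add_newlines := (s != "") && dn && (!fx) && (diff != 0)
  if s == "" then (np ++ [s], true, fx, c + 1)
  else if should_add_newlines then
    -- range(diff) is empty for diff ≤ 0, matched by Int.toNat
    (np ++ List.replicate diff.toNat "" ++ [s], dn, true, c)
  else if (s != "") && (!fx) then (np ++ [s], dn, fx, 0)
  else (np ++ [s], dn, fx, c)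

def insert_newlines (prefix_arr : List String) (newline_setting : Int) : List String :=
  let st := prefix_arr.foldl (insertNewlinesStep newline_setting) (([] : List String), false, false, (0 : Int))
  let final_diff := newline_setting - st.2.2.2
  if (!st.2.2.1) && (final_diff != 0) then st.1 ++ List.replicate final_diff.toNat ""
  else st.1

-- ===== PORT B =====
-- scan for the first non-empty index where blank lines must be spliced in;
-- returns (some pos, counter-at-pos) or (none, final counter)
def insertNewlinesScan (ns : Int) : List String → Bool → Int → Nat → Option Nat × Int
  | [], _, c, _ => (none, c)
  | s :: rest, seen, c, i =>
    if s == "" then insertNewlinesScan ns rest true (c + 1) (i + 1)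
    else if seen && (ns - c != 0) then (some i, c)
    else insertNewlinesScan ns rest seen 0 (i + 1)

def insert_newlines_alt (prefix_arr : List String) (newline_setting : Int) : List String :=
  match insertNewlinesScan newline_setting prefix_arr false 0 0 with
  | (none, c) => prefix_arr ++ List.replicate (newline_setting - c).toNat ""
  | (some pos, c) =>
      prefix_arr.take pos ++ List.replicate (newline_setting - c).toNat "" ++ prefix_arr.drop pos

-- ===== PRECONDITION & SPEC =====
def Spec_insert_newlines (prefix_arr : List String) (newline_setting : Int) (out : List String) : Prop := out = insert_newlines_alt prefix_arr newline_setting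
instance (prefix_arr : List String) (newline_setting : Int) (out : List String) : Decidable (Spec_insert_newlines prefix_arr newline_setting out) := by unfold Spec_insert_newlines; infer_instance

-- ===== CLAIM (what is proved, stated in full; the proofs are below) =====
def Claim_equal_insert_newlines : Prop := ∀ (prefix_arr : List String) (newline_setting : Int), Dom_insert_newlines prefix_arr newline_setting → Spec_insert_newlines prefix_arr newline_setting (insert_newlines prefix_arr newline_setting)

-- ===== LEMMAS AND PROOFS =====

-- finishing A's fold: the final blank-line padding
def insertNewlinesFinish (ns : Int) (st : List String × Bool × Bool × Int) : List String :=
  let final_diff := ns - st.2.2.2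
  if (!st.2.2.1) && (final_diff != 0) then st.1 ++ List.replicate final_diff.toNat ""
  else st.1

theorem scan_shift (ns : Int) (l : List String) (seen : Bool) (c : Int) (i : Nat) :
    insertNewlinesScan ns l seen c (i + 1) =
      ((insertNewlinesScan ns l seen c i).1.map (· + 1), (insertNewlinesScan ns l seen c i).2) := by
  induction l generalizing seen c i with
  | nil => simp [insertNewlinesScan]
  | cons s rest ih =>
    simp only [insertNewlinesScan]
    split_ifs with h1 h2
    · exact ih true (c + 1) (i + 1)
    · simp
    · exact ih seen 0 (i + 1)

-- once fixed, A only appends the remaining tokens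
theorem foldA_fixed (ns : Int) (l : List String) (np : List String) (dn : Bool) (c : Int) :
    (l.foldl (insertNewlinesStep ns) (np, dn, true, c)).2.2.1 = true ∧
    (l.foldl (insertNewlinesStep ns) (np, dn, true, c)).1 = np ++ l := by
  induction l generalizing np dn c with
  | nil => simp
  | cons s rest ih =>
    by_cases h1 : s = ""
    · subst h1
      have hstep : insertNewlinesStep ns (np, dn, true, c) "" = (np ++ [""], true, true, c + 1) := by
        simp [insertNewlinesStep]
      rw [List.foldl_cons, hstep]
      simpa using ih (np ++ [""]) true (c + 1)
    · have hstep : insertNewlinesStep ns (np, dn, true, c) s = (np ++ [s], dn, true, c) := by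
        simp [insertNewlinesStep, h1]
      rw [List.foldl_cons, hstep]
      simpa using ih (np ++ [s]) dn c

-- main invariant: while not fixed, A's remaining run equals B's locate-then-splice on the rest
theorem foldA_notfixed (ns : Int) (l : List String) (np : List String) (dn : Bool) (c : Int) :
    insertNewlinesFinish ns (l.foldl (insertNewlinesStep ns) (np, dn, false, c)) =
      match insertNewlinesScan ns l dn c 0 with
      | (none, c') => np ++ l ++ List.replicate (ns - c').toNat ""
      | (some j, c') => np ++ l.take j ++ List.replicate (ns - c').toNat "" ++ l.drop j := by
  induction l generalizing np dn c with
  | nil =>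
    simp only [insertNewlinesScan, List.foldl_nil, insertNewlinesFinish]
    by_cases h : ns - c = 0
    · simp [h]
    · simp [h]
  | cons s rest ih =>
    by_cases h1 : s = ""
    · subst h1
      have hstep : insertNewlinesStep ns (np, dn, false, c) "" = (np ++ [""], true, false, c + 1) := by
        simp [insertNewlinesStep]
      have hscan : insertNewlinesScan ns ("" :: rest) dn c 0 =
          ((insertNewlinesScan ns rest true (c + 1) 0).1.map (· + 1),
           (insertNewlinesScan ns rest true (c + 1) 0).2) := by
        simp only [insertNewlinesScan]
        rw [if_pos (show (("" == "") = true) from rfl), Nat.zero_add, scan_shift ns rest true (c + 1) 0]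
      rw [List.foldl_cons, hstep, ih (np ++ [""]) true (c + 1), hscan]
      rcases hsc : insertNewlinesScan ns rest true (c + 1) 0 with ⟨o, c'⟩
      cases o <;> simp
    · by_cases h2 : dn = true ∧ ns - c ≠ 0
      · have hstep : insertNewlinesStep ns (np, dn, false, c) s =
            (np ++ List.replicate (ns - c).toNat "" ++ [s], dn, true, c) := by
          simp [insertNewlinesStep, h1, h2.1, h2.2]
        have hscan : insertNewlinesScan ns (s :: rest) dn c 0 = (some 0, c) := by
          simp [insertNewlinesScan, h1, h2.1, h2.2]
        rw [List.foldl_cons, hstep, hscan]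
        obtain ⟨hfx, hnp⟩ := foldA_fixed ns rest (np ++ List.replicate (ns - c).toNat "" ++ [s]) dn c
        have hfin : insertNewlinesFinish ns (List.foldl (insertNewlinesStep ns)
            (np ++ List.replicate (ns - c).toNat "" ++ [s], dn, true, c) rest) =
            np ++ List.replicate (ns - c).toNat "" ++ [s] ++ rest := by
          unfold insertNewlinesFinish
          rw [hfx, hnp]
          simp
        rw [hfin]
        simp
      · have hshould : ((s != "") && dn && (!false) && ((ns - c) != 0)) = false := by
          cases hd : dn
          · simp
          · have h0 : ns - c = 0 := by
              by_contra hne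
              exact h2 ⟨hd, hne⟩
            simp [h0]
        have hcond : (dn && ((ns - c) != 0)) = false := by
          cases hd : dn
          · simp
          · have h0 : ns - c = 0 := by
              by_contra hne
              exact h2 ⟨hd, hne⟩
            simp [h0]
        have hstep : insertNewlinesStep ns (np, dn, false, c) s = (np ++ [s], dn, false, 0) := by
          simp only [insertNewlinesStep]
          rw [if_neg (by simp [h1]), if_neg (by simp only [hshould]; exact Bool.false_ne_true), if_pos (by simp [h1])]
        have hscan : insertNewlinesScan ns (s :: rest) dn c 0 =
            ((insertNewlinesScan ns rest dn 0 0).1.map (· + 1),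
             (insertNewlinesScan ns rest dn 0 0).2) := by
          simp only [insertNewlinesScan]
          rw [if_neg (by simp [h1]), if_neg (by simp only [hcond]; exact Bool.false_ne_true), Nat.zero_add,
            scan_shift ns rest dn 0 0]
        rw [List.foldl_cons, hstep, ih (np ++ [s]) dn 0, hscan]
        rcases hsc : insertNewlinesScan ns rest dn 0 0 with ⟨o, c'⟩
        cases o <;> simp

-- ===== VERDICT (by name: the statement is the Claim_ definition above) =====
theorem insert_newlines_spec : Claim_equal_insert_newlines := by
  intro arr ns _
  unfold Spec_insert_newlines insert_newlines insert_newlines_alt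
  have h := foldA_notfixed ns arr [] false 0
  unfold insertNewlinesFinish at h
  simp only at h
  rw [h]
  rcases hsc : insertNewlinesScan ns arr false 0 0 with ⟨o, c'⟩
  cases o <;> simp
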